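-- pv_equiv track=rewrite | github.com/dlsrnjs125/Algorithm | 프로그래머스/0/120837. 개미 군단/개미 군단.py | solution
-- ===== SOURCE A (Python) =====
-- def solution(hp):
--     answer = 0
--     ant = [5, 3, 1]
--     if hp >= 0:
--         for i in ant:
--             count = hp // i
--             answer += count
--             hp -= count * i
--
--     return answer
-- ===== SOURCE B (Python) =====
-- def solution(hp):
--     if hp < 0:
--         return 0
--     # one division by 5 plus a precomputed residue table: the minimal tail
--     # counts for hp % 5 are fixed, so no greedy pass over denominations is needed
--     extra = (0, 1, 2, 1, 2)
--     return hp // 5 + extra[hp % 5]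
-- ===== Notes on version B (the rewrite author's own statement) =====
-- stated objective: simpler
-- what changed: Replaces the greedy loop over the denomination list by a single division by the largest denomination plus a precomputed residue lookup table; no per-denomination pass remains.
import Mathlib
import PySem

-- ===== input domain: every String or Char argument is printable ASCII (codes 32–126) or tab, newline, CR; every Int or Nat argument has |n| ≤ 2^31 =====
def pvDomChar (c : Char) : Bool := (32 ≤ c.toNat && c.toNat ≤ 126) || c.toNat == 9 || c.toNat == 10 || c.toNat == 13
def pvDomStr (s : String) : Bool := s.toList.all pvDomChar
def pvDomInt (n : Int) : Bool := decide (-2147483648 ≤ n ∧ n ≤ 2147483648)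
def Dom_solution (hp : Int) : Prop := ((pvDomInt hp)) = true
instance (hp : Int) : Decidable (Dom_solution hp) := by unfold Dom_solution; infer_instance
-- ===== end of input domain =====

-- B replaces A's greedy loop over the denomination list by one division plus a residue lookup table (simpler).


-- ===== PORT A =====
-- the loop `for i in [5,3,1]` is a foldl over the mutable state (answer, hp)
def solution (hp : Int) : Int :=
  let answer : Int := 0
  if hp ≥ 0 then
    let st := [(5 : Int), 3, 1].foldl
      (fun (s : Int × Int) i =>
        let count := PySem.Int.floordiv s.2 i
        (s.1 + count, s.2 - count * i)) (answer, hp)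
    st.1
  else answer

-- ===== PORT B =====
-- tuple indexing `extra[hp % 5]` → pyGet?; the index is always in [0,4] here, so
-- the `.getD 0` default is never taken (Python never raises on this branch)
def solution_alt (hp : Int) : Int :=
  if hp < 0 then 0
  else
    let extra : List Int := [0, 1, 2, 1, 2]
    PySem.Int.floordiv hp 5 + (PySem.List.pyGet? extra (PySem.Int.mod hp 5)).getD 0

-- ===== PRECONDITION & SPEC =====
def Spec_solution (hp : Int) (out : Int) : Prop := out = solution_alt hp
instance (hp : Int) (out : Int) : Decidable (Spec_solution hp out) := by unfold Spec_solution; infer_instance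

-- ===== CLAIM (what is proved, stated in full; the proofs are below) =====
def Claim_equal_solution : Prop := ∀ (hp : Int), Dom_solution hp → Spec_solution hp (solution hp)

-- ===== LEMMAS AND PROOFS =====

theorem solution_eq_alt (hp : Int) : solution hp = solution_alt hp := by
  unfold solution solution_alt
  by_cases h : hp ≥ 0
  · rw [if_pos h, if_neg (by omega)]
    simp only [List.foldl, PySem.Int.floordiv, PySem.Int.mod]
    rw [Int.fdiv_eq_ediv_of_nonneg hp (by norm_num), Int.fmod_eq_emod]
    have hm5 : 0 ≤ hp % 5 := Int.emod_nonneg hp (by norm_num)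
    have hm5' : hp % 5 < 5 := Int.emod_lt_of_pos hp (by norm_num)
    have e1 : hp - hp / 5 * 5 = hp % 5 := by omega
    rw [Int.fdiv_eq_ediv_of_nonneg _ (by norm_num : (0:ℤ) ≤ 3)]
    simp only [add_zero, e1, Int.fdiv_one]
    -- case on the residue hp % 5 ∈ {0,1,2,3,4}
    set r := hp % 5 with hr
    interval_cases r <;> simp [PySem.List.pyGet?, PySem.List.pyIdx?] <;> omega
  · rw [if_neg h, if_pos (by omega)]

-- ===== VERDICT (by name: the statement is the Claim_ definition above) =====
theorem solution_spec : Claim_equal_solution := by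
  intro hp _
  exact solution_eq_alt hp
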